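-- pv_equiv track=rewrite | github.com/Mavhawk64/GeneralizednLinkRobotManipulatorSimulationAndControlDesign | lagrange.py | kinetic_energy
-- ===== SOURCE A (Python) =====
-- def kinetic_energy(N):
-- 	ret = ""
-- 	for n in range(1,N+1):
-- 		ret += "\\frac{1}{2}\\left("
-- 		for j in range(n,N+1):
-- 			ret += "m_{"+str(j)+"}+"
-- 		ret = ret[:-1] + "\\right)l_{"+str(n)+"}^2\\dot{\\theta}_{"+str(n)+"}^2+"
-- 	for n in range(2,N+1):
-- 		ret += "\\left("
-- 		for j in range(n,N+1):
-- 			ret += "m_{"+str(j)+"}+"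
-- 		ret = ret[:-1] + "\\right)\\left("
-- 		for i in range(1,n):
-- 			ret += "l_{"+str(i)+"}l_{"+str(n)+"}\\dot{\\theta}_{"+str(i)+"}\\dot{\\theta}_{"+str(n)+"}\\cos(\\theta_{"+str(i)+"}-\\theta_{"+str(n)+"})+"
-- 		ret = ret[:-1] + "\\right)+"
-- 	ret = ret[:-1]
-- 	return ret
-- ===== SOURCE B (Python) =====
-- def _suffix_masses(n, N):
--     """Suffix mass-sum strings ['m_{n}+...+m_{N}', ..., 'm_{N}'], built once by recursion."""
--     if n > N:
--         return []
--     rest = _suffix_masses(n + 1, N)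
--     s = "m_{" + str(n) + "}" + ("+" + rest[0] if rest else "")
--     return [s] + rest
--
--
-- def kinetic_energy(N):
--     mass = _suffix_masses(1, N)
--     terms = []
--     for n, m in zip(range(1, N + 1), mass):
--         terms.append("\\frac{1}{2}\\left(" + m + "\\right)l_{" + str(n)
--                      + "}^2\\dot{\\theta}_{" + str(n) + "}^2")
--     for n, m in zip(range(2, N + 1), mass[1:]):
--         cross = "+".join(
--             "l_{" + str(i) + "}l_{" + str(n) + "}\\dot{\\theta}_{" + str(i)
--             + "}\\dot{\\theta}_{" + str(n) + "}\\cos(\\theta_{" + str(i)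
--             + "}-\\theta_{" + str(n) + "})"
--             for i in range(1, n))
--         terms.append("\\left(" + m + "\\right)\\left(" + cross + "\\right)")
--     return "+".join(terms)
-- ===== Notes on version B (the rewrite author's own statement) =====
-- stated objective: simpler
-- what changed: B precomputes every suffix mass-sum string once (a single recursive backward build) and assembles the terms into a list joined with '+', instead of A's re-scanning the mass suffix inside both loops and repeatedly appending a trailing '+' that is sliced off again.
import Mathlib
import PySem

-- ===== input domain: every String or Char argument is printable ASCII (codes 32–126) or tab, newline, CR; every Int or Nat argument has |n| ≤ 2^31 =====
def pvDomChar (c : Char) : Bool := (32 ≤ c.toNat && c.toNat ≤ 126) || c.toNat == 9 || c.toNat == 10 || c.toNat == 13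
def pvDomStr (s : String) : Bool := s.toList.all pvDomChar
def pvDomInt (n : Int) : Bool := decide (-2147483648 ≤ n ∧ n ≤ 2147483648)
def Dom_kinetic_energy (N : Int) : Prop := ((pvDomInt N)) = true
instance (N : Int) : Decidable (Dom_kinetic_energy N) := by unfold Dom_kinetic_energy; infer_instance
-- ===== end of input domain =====

-- B builds each suffix mass-sum string once by a single backward pass and assembles the
-- terms into a list joined with '+', instead of A's repeated inner mass rescans and
-- trailing-'+' trimming (objective: simpler; strings are modelled as List Char via PySem.Chars).

-- ===== PORT A =====
def kinetic_energy (N : Int) : String :=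
  let ret : List Char := []
  -- for n in range(1, N+1): … first (squared) terms …
  let ret := (PySem.List.pyRange 1 (N+1) 1).foldl (fun ret n =>
    let ret := ret ++ "\\frac{1}{2}\\left(".toList
    let ret := (PySem.List.pyRange n (N+1) 1).foldl
      (fun ret j => ret ++ ("m_{".toList ++ PySem.Int.toChars j ++ "}+".toList)) ret
    PySem.List.slice ret none (some (-1)) ++
      ("\\right)l_{".toList ++ PySem.Int.toChars n ++ "}^2\\dot{\\theta}_{".toList ++
        PySem.Int.toChars n ++ "}^2+".toList)) ret
  -- for n in range(2, N+1): … cosine cross terms …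
  let ret := (PySem.List.pyRange 2 (N+1) 1).foldl (fun ret n =>
    let ret := ret ++ "\\left(".toList
    let ret := (PySem.List.pyRange n (N+1) 1).foldl
      (fun ret j => ret ++ ("m_{".toList ++ PySem.Int.toChars j ++ "}+".toList)) ret
    let ret := PySem.List.slice ret none (some (-1)) ++ "\\right)\\left(".toList
    let ret := (PySem.List.pyRange 1 n 1).foldl
      (fun ret i => ret ++ ("l_{".toList ++ PySem.Int.toChars i ++ "}l_{".toList ++
        PySem.Int.toChars n ++ "}\\dot{\\theta}_{".toList ++ PySem.Int.toChars i ++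
        "}\\dot{\\theta}_{".toList ++ PySem.Int.toChars n ++ "}\\cos(\\theta_{".toList ++
        PySem.Int.toChars i ++ "}-\\theta_{".toList ++ PySem.Int.toChars n ++ "})+".toList)) ret
    PySem.List.slice ret none (some (-1)) ++ "\\right)+".toList) ret
  String.ofList (PySem.List.slice ret none (some (-1)))

-- ===== PORT B =====
-- helper: Source B's recursive _suffix_masses
def pvSuffixMasses (n N : Int) : List (List Char) :=
  if _h : n > N then []
  else
    ("m_{".toList ++ PySem.Int.toChars n ++ "}".toList ++
      (match pvSuffixMasses (n+1) N with | [] => [] | r :: _ => '+' :: r)) ::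
      pvSuffixMasses (n+1) N
termination_by (N + 1 - n).toNat
decreasing_by all_goals (simp_wf; omega)

def kinetic_energy_alt (N : Int) : String :=
  let mass := pvSuffixMasses 1 N
  let terms := ((PySem.List.pyRange 1 (N+1) 1).zip mass).map (fun nm =>
    "\\frac{1}{2}\\left(".toList ++ nm.2 ++ "\\right)l_{".toList ++ PySem.Int.toChars nm.1 ++
      "}^2\\dot{\\theta}_{".toList ++ PySem.Int.toChars nm.1 ++ "}^2".toList)
  let terms := terms ++ ((PySem.List.pyRange 2 (N+1) 1).zip (PySem.List.slice mass (some 1) none)).map (fun nm =>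
    "\\left(".toList ++ nm.2 ++ "\\right)\\left(".toList ++
      PySem.Chars.join ['+'] ((PySem.List.pyRange 1 nm.1 1).map (fun i =>
        "l_{".toList ++ PySem.Int.toChars i ++ "}l_{".toList ++ PySem.Int.toChars nm.1 ++
          "}\\dot{\\theta}_{".toList ++ PySem.Int.toChars i ++ "}\\dot{\\theta}_{".toList ++
          PySem.Int.toChars nm.1 ++ "}\\cos(\\theta_{".toList ++ PySem.Int.toChars i ++
          "}-\\theta_{".toList ++ PySem.Int.toChars nm.1 ++ "})".toList)) ++ "\\right)".toList)
  String.ofList (PySem.Chars.join ['+'] terms)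

-- ===== PRECONDITION & SPEC =====
def Spec_kinetic_energy (N : Int) (out : String) : Prop := out = kinetic_energy_alt N
instance (N : Int) (out : String) : Decidable (Spec_kinetic_energy N out) := by unfold Spec_kinetic_energy; infer_instance

-- ===== CLAIM (what is proved, stated in full; the proofs are below) =====
def Claim_equal_kinetic_energy : Prop := ∀ (N : Int), Dom_kinetic_energy N → Spec_kinetic_energy N (kinetic_energy N)

-- ===== LEMMAS AND PROOFS =====

-- proof-side names for the building blocks both programs assemble
def pvGm (j : Int) : List Char := "m_{".toList ++ PySem.Int.toChars j ++ "}+".toList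

def pvMassStr (n N : Int) : List Char := ((PySem.List.pyRange n (N+1) 1).flatMap pvGm).dropLast

def pvCross (i n : Int) : List Char :=
  "l_{".toList ++ PySem.Int.toChars i ++ "}l_{".toList ++ PySem.Int.toChars n ++
    "}\\dot{\\theta}_{".toList ++ PySem.Int.toChars i ++ "}\\dot{\\theta}_{".toList ++
    PySem.Int.toChars n ++ "}\\cos(\\theta_{".toList ++ PySem.Int.toChars i ++
    "}-\\theta_{".toList ++ PySem.Int.toChars n ++ "})".toList

def pvTerm1 (N n : Int) : List Char :=
  "\\frac{1}{2}\\left(".toList ++ pvMassStr n N ++ "\\right)l_{".toList ++ PySem.Int.toChars n ++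
    "}^2\\dot{\\theta}_{".toList ++ PySem.Int.toChars n ++ "}^2".toList

def pvTerm2 (N n : Int) : List Char :=
  "\\left(".toList ++ pvMassStr n N ++ "\\right)\\left(".toList ++
    PySem.Chars.join ['+'] ((PySem.List.pyRange 1 n 1).map (fun i => pvCross i n)) ++ "\\right)".toList

-- "+"-joined pieces vs "append '+' after each piece, then trim the last character"
lemma pv_dropLast_flatMap_plus (ts : List (List Char)) :
    (ts.flatMap (fun t => t ++ ['+'])).dropLast = PySem.Chars.join ['+'] ts := by
  induction ts with
  | nil => rfl
  | cons t ts ih =>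
    cases ts with
    | nil => simp [PySem.Chars.join_singleton]
    | cons u us =>
      rw [List.flatMap_cons, PySem.Chars.join_cons_cons,
        List.dropLast_append_of_ne_nil (by simp [List.flatMap_cons]), ih]

lemma pv_flatMap_gm_ne_nil (n N : Int) (h : n ≤ N) :
    (PySem.List.pyRange n (N+1) 1).flatMap pvGm ≠ [] := by
  rw [PySem.List.pyRange_one_cons (by omega), List.flatMap_cons]
  simp [pvGm]

lemma pv_massStr_rec (n N : Int) (h : n ≤ N) :
    pvMassStr n N = "m_{".toList ++ PySem.Int.toChars n ++ ['}'] ++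
      (if n < N then '+' :: pvMassStr (n+1) N else []) := by
  unfold pvMassStr
  rw [PySem.List.pyRange_one_cons (by omega), List.flatMap_cons]
  by_cases hnN : n < N
  · rw [List.dropLast_append_of_ne_nil (pv_flatMap_gm_ne_nil (n+1) N (by omega))]
    simp [hnN, pvGm]
  · have hnil : PySem.List.pyRange (n+1) (N+1) 1 = [] := PySem.List.pyRange_one_eq_nil (by omega)
    rw [hnil]
    simp only [List.flatMap_nil, List.append_nil]
    have : pvGm n = ("m_{".toList ++ PySem.Int.toChars n ++ ['}']) ++ ['+'] := by simp [pvGm]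
    rw [this, List.dropLast_concat]
    simp [hnN]

lemma pv_suffix_eq (N : Int) : ∀ (m : Nat) (n : Int), (N + 1 - n).toNat = m →
    pvSuffixMasses n N = (PySem.List.pyRange n (N+1) 1).map (fun x => pvMassStr x N) := by
  intro m
  induction m with
  | zero =>
    intro n hm
    rw [pvSuffixMasses.eq_def, dif_pos (by omega : n > N),
      PySem.List.pyRange_one_eq_nil (by omega), List.map_nil]
  | succ m ih =>
    intro n hm
    rw [pvSuffixMasses.eq_def, dif_neg (by omega : ¬ n > N), ih (n+1) (by omega),
      PySem.List.pyRange_one_cons (by omega : n < N+1), List.map_cons]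
    congr 1
    by_cases hk : n < N
    · rw [PySem.List.pyRange_one_cons (by omega : n+1 < N+1), List.map_cons,
        pv_massStr_rec n N (by omega)]
      simp [hk, List.append_assoc]
    · rw [PySem.List.pyRange_one_eq_nil (by omega), List.map_nil,
        pv_massStr_rec n N (by omega)]
      simp [hk]

-- literal splits used to peel the trailing '+' of each appended piece
lemma pv_lit1 : "}^2+".toList = "}^2".toList ++ ['+'] := by decide
lemma pv_lit2 : "})+".toList = "})".toList ++ ['+'] := by decide
lemma pv_lit3 : "\\right)+".toList = "\\right)".toList ++ ['+'] := by decide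

-- A's first-loop body appends exactly pvTerm1 n plus a '+'
lemma pv_A_body1 (N : Int) (ret : List Char) (n : Int) (h2 : n ≤ N) :
    PySem.List.slice ((PySem.List.pyRange n (N+1) 1).foldl
        (fun ret j => ret ++ ("m_{".toList ++ PySem.Int.toChars j ++ "}+".toList))
        (ret ++ "\\frac{1}{2}\\left(".toList)) none (some (-1)) ++
      ("\\right)l_{".toList ++ PySem.Int.toChars n ++ "}^2\\dot{\\theta}_{".toList ++
        PySem.Int.toChars n ++ "}^2+".toList)
    = ret ++ (pvTerm1 N n ++ ['+']) := by
  rw [show (fun (ret : List Char) (j : Int) => ret ++ ("m_{".toList ++ PySem.Int.toChars j ++ "}+".toList))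
      = (fun ret j => ret ++ pvGm j) from rfl,
    PySem.List.foldl_append_eq_flatMap, PySem.List.slice_to_neg_one,
    List.dropLast_append_of_ne_nil (pv_flatMap_gm_ne_nil n N h2)]
  simp [pvTerm1, pvMassStr, pv_lit1, List.append_assoc]

-- A's second-loop body appends exactly pvTerm2 n plus a '+'
lemma pv_A_body2 (N : Int) (ret : List Char) (n : Int) (h1 : 2 ≤ n) (h2 : n ≤ N) :
    PySem.List.slice ((PySem.List.pyRange 1 n 1).foldl
        (fun ret i => ret ++ ("l_{".toList ++ PySem.Int.toChars i ++ "}l_{".toList ++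
          PySem.Int.toChars n ++ "}\\dot{\\theta}_{".toList ++ PySem.Int.toChars i ++
          "}\\dot{\\theta}_{".toList ++ PySem.Int.toChars n ++ "}\\cos(\\theta_{".toList ++
          PySem.Int.toChars i ++ "}-\\theta_{".toList ++ PySem.Int.toChars n ++ "})+".toList))
        (PySem.List.slice ((PySem.List.pyRange n (N+1) 1).foldl
            (fun ret j => ret ++ ("m_{".toList ++ PySem.Int.toChars j ++ "}+".toList))
            (ret ++ "\\left(".toList)) none (some (-1)) ++ "\\right)\\left(".toList))
      none (some (-1)) ++ "\\right)+".toList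
    = ret ++ (pvTerm2 N n ++ ['+']) := by
  have hmass : PySem.List.slice ((PySem.List.pyRange n (N+1) 1).foldl
      (fun ret j => ret ++ ("m_{".toList ++ PySem.Int.toChars j ++ "}+".toList))
      (ret ++ "\\left(".toList)) none (some (-1))
      = (ret ++ "\\left(".toList) ++ pvMassStr n N := by
    rw [show (fun (ret : List Char) (j : Int) => ret ++ ("m_{".toList ++ PySem.Int.toChars j ++ "}+".toList))
        = (fun ret j => ret ++ pvGm j) from rfl,
      PySem.List.foldl_append_eq_flatMap, PySem.List.slice_to_neg_one,
      List.dropLast_append_of_ne_nil (pv_flatMap_gm_ne_nil n N h2)]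
    rfl
  rw [hmass,
    show (fun (ret : List Char) (i : Int) => ret ++ ("l_{".toList ++ PySem.Int.toChars i ++ "}l_{".toList ++
          PySem.Int.toChars n ++ "}\\dot{\\theta}_{".toList ++ PySem.Int.toChars i ++
          "}\\dot{\\theta}_{".toList ++ PySem.Int.toChars n ++ "}\\cos(\\theta_{".toList ++
          PySem.Int.toChars i ++ "}-\\theta_{".toList ++ PySem.Int.toChars n ++ "})+".toList))
      = (fun ret i => ret ++ (pvCross i n ++ ['+'])) from by
        funext ret i; simp [pvCross, pv_lit2, List.append_assoc],
    PySem.List.foldl_append_eq_flatMap, PySem.List.slice_to_neg_one]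
  rw [show (PySem.List.pyRange 1 n 1).flatMap (fun i => pvCross i n ++ ['+'])
      = ((PySem.List.pyRange 1 n 1).map (fun i => pvCross i n)).flatMap (fun t => t ++ ['+'])
      from (List.flatMap_map (fun i => pvCross i n) (fun t => t ++ ['+'])
        (PySem.List.pyRange 1 n 1)).symm]
  rw [List.dropLast_append_of_ne_nil]
  · rw [pv_dropLast_flatMap_plus]
    simp [pvTerm2, pvMassStr, pv_lit3, List.append_assoc]
  · rw [PySem.List.pyRange_one_cons (by omega : (1:Int) < n), List.map_cons, List.flatMap_cons]
    simp [pvCross]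

-- closed form of port A
lemma pv_A_char (N : Int) : kinetic_energy N = String.ofList
    (PySem.Chars.join ['+'] ((PySem.List.pyRange 1 (N+1) 1).map (pvTerm1 N) ++
      (PySem.List.pyRange 2 (N+1) 1).map (pvTerm2 N))) := by
  simp only [kinetic_energy]
  rw [PySem.List.foldl_congr_mem (PySem.List.pyRange 1 (N+1) 1) _
      (fun ret n => ret ++ (pvTerm1 N n ++ ['+'])) []
      (fun acc x hx => pv_A_body1 N acc x (by
        have := (PySem.List.mem_pyRange_one).1 hx; omega)),
    PySem.List.foldl_append_eq_flatMap, List.nil_append]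
  rw [PySem.List.foldl_congr_mem (PySem.List.pyRange 2 (N+1) 1) _
      (fun ret n => ret ++ (pvTerm2 N n ++ ['+'])) _
      (fun acc x hx => pv_A_body2 N acc x
        (by have := (PySem.List.mem_pyRange_one).1 hx; omega)
        (by have := (PySem.List.mem_pyRange_one).1 hx; omega)),
    PySem.List.foldl_append_eq_flatMap, PySem.List.slice_to_neg_one]
  rw [show (PySem.List.pyRange 1 (N+1) 1).flatMap (fun n => pvTerm1 N n ++ ['+'])
      = ((PySem.List.pyRange 1 (N+1) 1).map (pvTerm1 N)).flatMap (fun t => t ++ ['+'])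
      from (List.flatMap_map (pvTerm1 N) (fun t => t ++ ['+'])
        (PySem.List.pyRange 1 (N+1) 1)).symm,
    show (PySem.List.pyRange 2 (N+1) 1).flatMap (fun n => pvTerm2 N n ++ ['+'])
      = ((PySem.List.pyRange 2 (N+1) 1).map (pvTerm2 N)).flatMap (fun t => t ++ ['+'])
      from (List.flatMap_map (pvTerm2 N) (fun t => t ++ ['+'])
        (PySem.List.pyRange 2 (N+1) 1)).symm,
    ← List.flatMap_append, pv_dropLast_flatMap_plus]

-- the tail of range(1, N+1) is range(2, N+1)
lemma pv_range_tail (N : Int) :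
    (PySem.List.pyRange 1 (N+1) 1).tail = PySem.List.pyRange 2 (N+1) 1 := by
  by_cases h : 1 < N + 1
  · rw [PySem.List.pyRange_one_cons h]; rfl
  · rw [PySem.List.pyRange_one_eq_nil (by omega), PySem.List.pyRange_one_eq_nil (by omega)]
    rfl

-- closed form of port B
lemma pv_zip_map (l : List Int) (g : Int → List Char) :
    l.zip (l.map g) = l.map (fun x => (x, g x)) := by
  induction l with
  | nil => rfl
  | cons x l ih => simp [ih]

lemma pv_B_char (N : Int) : kinetic_energy_alt N = String.ofList
    (PySem.Chars.join ['+'] ((PySem.List.pyRange 1 (N+1) 1).map (pvTerm1 N) ++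
      (PySem.List.pyRange 2 (N+1) 1).map (pvTerm2 N))) := by
  simp only [kinetic_energy_alt]
  rw [pv_suffix_eq N (N + 1 - 1).toNat 1 rfl, PySem.List.slice_from_one, ← List.map_tail, pv_range_tail,
    pv_zip_map, pv_zip_map, List.map_map, List.map_map]
  rfl


-- ===== VERDICT (by name: the statement is the Claim_ definition above) =====
theorem kinetic_energy_spec : Claim_equal_kinetic_energy := by
  intro N _
  unfold Spec_kinetic_energy
  rw [pv_A_char, pv_B_char]
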